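-- pv_equiv track=rewrite | github.com/YutaoZou/single_double_eye_and_struct_features_base_RETFound_MAE | single_eye_struct_fusion_retfound.py | _extract_raw_id
-- ===== SOURCE A (Python) =====
-- def _extract_raw_id(img_name):
--     """辅助函数：从增强图/原始图文件名中提取原始ID（适配多种格式）"""
--     parts = img_name.split("_")
--     # 1. 优先匹配原始逻辑（machong/shengyi前缀的ID）
--     for part in parts:
--         if part.startswith(("machong", "shengyi")):
--             return part
--     # 2. 匹配"right"或"left"后面的纯数字ID（如1637686）
--     for i, part in enumerate(parts):
--         # 修正逻辑：判断当前部分是"right"或"left"，且下一部分是数字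
--         if part in ("right", "left") and i + 1 < len(parts) and parts[i+1].isdigit():
--             return parts[i+1]
--     # 3. 若都不匹配，返回空字符串
--     return ""
-- ===== SOURCE B (Python) =====
-- def _extract_raw_id(img_name):
--     # Single pass with lookahead: prefix hits return eagerly; the first
--     # right/left-followed-by-digits token is remembered as a fallback.
--     parts = img_name.split("_")
--     fallback = None
--     for part, nxt in zip(parts, parts[1:] + [None]):
--         if part.startswith(("machong", "shengyi")):
--             return part
--         if fallback is None and part in ("right", "left") and nxt is not None and nxt.isdigit():
--             fallback = nxt
--     return fallback if fallback is not None else ""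
-- ===== Notes on version B (the rewrite author's own statement) =====
-- stated objective: simpler
-- what changed: A's two separate scans over the split parts (prefix scan, then a second indexed scan for right/left followed by digits) are collapsed into one lookahead pass over (part, next) pairs that returns prefix matches eagerly and remembers the first right/left digit successor as a fallback.
import Mathlib
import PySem

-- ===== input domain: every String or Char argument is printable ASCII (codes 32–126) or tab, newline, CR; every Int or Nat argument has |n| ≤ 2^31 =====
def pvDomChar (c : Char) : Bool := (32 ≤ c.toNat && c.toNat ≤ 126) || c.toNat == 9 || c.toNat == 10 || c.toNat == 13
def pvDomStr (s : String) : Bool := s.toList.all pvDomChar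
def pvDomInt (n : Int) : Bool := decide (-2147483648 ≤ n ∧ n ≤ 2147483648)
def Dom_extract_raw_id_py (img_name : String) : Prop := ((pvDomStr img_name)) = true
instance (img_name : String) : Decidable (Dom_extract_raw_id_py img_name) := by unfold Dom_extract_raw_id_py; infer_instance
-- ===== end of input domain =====

-- B replaces A's two scans (prefix scan, then an indexed right/left scan) by one
-- lookahead pass keeping a fallback; objective: simpler (one pass, no indexing).

-- ===== PORT A =====
-- A's first loop: return the first part starting with "machong"/"shengyi"
def aLoop1 : List String → Option String
  | [] => none
  | p :: ps =>
    if PySem.Str.startswith p "machong" || PySem.Str.startswith p "shengyi" then some p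
    else aLoop1 ps

-- A's second loop: for i, part in enumerate(parts): if part in ("right","left")
-- and i+1 < len(parts) and parts[i+1].isdigit(): return parts[i+1]
def aLoop2 (parts : List String) : List (Int × String) → String
  | [] => ""
  | (i, part) :: rest =>
    if ((part == "right" || part == "left")
        && decide (i + 1 < (parts.length : Int))
        && PySem.Str.strIsdigit (PySem.List.pyGetD parts (i + 1) "")) then
      PySem.List.pyGetD parts (i + 1) ""
    else aLoop2 parts rest

def extract_raw_id_py (img_name : String) : String :=
  let parts := (PySem.Str.split? img_name "_").getD []
  match aLoop1 parts with
  | some p => p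
  | none => aLoop2 parts (PySem.List.enumerate parts 0)

-- ===== PORT B =====
-- B's single loop over (part, next) pairs carrying the fallback accumulator
def bLoop : List String → Option String → String
  | [], fb => fb.getD ""
  | part :: rest, fb =>
    if PySem.Str.startswith part "machong" || PySem.Str.startswith part "shengyi" then part
    else
      bLoop rest
        (if fb.isNone && (part == "right" || part == "left") then
          match rest with
          | nxt :: _ => if PySem.Str.strIsdigit nxt then some nxt else fb
          | [] => fb
        else fb)

def extract_raw_id_py_alt (img_name : String) : String :=
  bLoop ((PySem.Str.split? img_name "_").getD []) none

-- ===== PRECONDITION & SPEC =====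
def Spec_extract_raw_id_py (img_name : String) (out : String) : Prop := out = extract_raw_id_py_alt img_name
instance (img_name : String) (out : String) : Decidable (Spec_extract_raw_id_py img_name out) := by unfold Spec_extract_raw_id_py; infer_instance

-- ===== CLAIM (what is proved, stated in full; the proofs are below) =====
def Claim_equal_extract_raw_id_py : Prop := ∀ (img_name : String), Dom_extract_raw_id_py img_name → Spec_extract_raw_id_py img_name (extract_raw_id_py img_name)

-- ===== LEMMAS AND PROOFS =====

-- structural form of A's second loop (lookahead instead of indexing)
def sLoop : List String → String
  | [] => ""
  | part :: rest =>
    if ((part == "right" || part == "left")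
        && match rest with | nxt :: _ => PySem.Str.strIsdigit nxt | [] => false) then
      rest.headD ""
    else sLoop rest

theorem aLoop2_eq (suf pre : List String) :
    aLoop2 (pre ++ suf) (PySem.List.enumerate suf (pre.length : Int)) = sLoop suf := by
  induction suf generalizing pre with
  | nil => simp [PySem.List.enumerate, aLoop2, sLoop]
  | cons part rest ih =>
    rw [PySem.List.enumerate_cons]
    have hget : PySem.List.pyGetD (pre ++ part :: rest) ((pre.length : Int) + 1) "" = rest.headD "" := by
      have h1 : ((pre.length : Int) + 1) = ((pre.length + 1 : Nat) : Int) := by push_cast; ring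
      rw [h1, PySem.List.pyGetD_natCast]
      cases rest with
      | nil => simp [List.getD]
      | cons n r => simp [List.getD]
    have ih' : aLoop2 (pre ++ part :: rest) (PySem.List.enumerate rest ((pre.length : Int) + 1)) = sLoop rest := by
      have h := ih (pre ++ [part])
      simp only [List.append_assoc, List.singleton_append, List.length_append,
        List.length_singleton, Nat.cast_add, Nat.cast_one] at h
      exact h
    unfold aLoop2 sLoop
    rw [hget, ih']
    cases rest with
    | nil =>
      simp
    | cons n r =>
      have hb : ((pre.length : Int) + 1 < (((pre ++ part :: n :: r).length : Nat) : Int)) := by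
        simp only [List.length_append, List.length_cons]
        push_cast
        omega
      rw [decide_eq_true hb]
      simp

-- B's loop against A's two loops plus the fallback
theorem bLoop_eq (suf : List String) (fb : Option String) :
    bLoop suf fb =
      match aLoop1 suf with
      | some p => p
      | none => match fb with
        | some f => f
        | none => sLoop suf := by
  induction suf generalizing fb with
  | nil => cases fb <;> simp [bLoop, aLoop1, sLoop]
  | cons part rest ih =>
    unfold bLoop aLoop1
    cases hpre : (PySem.Str.startswith part "machong" || PySem.Str.startswith part "shengyi") with
    | true => simp
    | false =>
      simp only [Bool.false_eq_true, if_false]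
      cases fb with
      | some f => simp [ih]
      | none =>
        cases hpl : (part == "right" || part == "left") with
        | false => simp [ih, sLoop, hpl]
        | true =>
          cases rest with
          | nil => simp [ih, sLoop, aLoop1]
          | cons n r =>
            cases hd : PySem.Chars.strIsdigit n.toList with
            | true => cases h1 : aLoop1 (n :: r) <;> simp [ih, sLoop, hpl, hd, h1]
            | false => cases h1 : aLoop1 (n :: r) <;> simp [ih, sLoop, hpl, hd, h1]

-- ===== VERDICT (by name: the statement is the Claim_ definition above) =====
theorem extract_raw_id_py_spec : Claim_equal_extract_raw_id_py := by
  intro img _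
  unfold Spec_extract_raw_id_py extract_raw_id_py extract_raw_id_py_alt
  rw [bLoop_eq]
  have h := aLoop2_eq ((PySem.Str.split? img "_").getD []) []
  simp only [List.nil_append, List.length_nil, Nat.cast_zero] at h
  show (match aLoop1 ((PySem.Str.split? img "_").getD []) with
        | some p => p
        | none => aLoop2 ((PySem.Str.split? img "_").getD [])
            (PySem.List.enumerate ((PySem.Str.split? img "_").getD []) 0)) = _
  rw [h]
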